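-- pv_equiv track=rewrite | github.com/sweetypriya22/DATA-STRUCTURE-II | Global Conference Attendees.prompt.py | analyse_attendance
-- ===== SOURCE A (Python) =====
-- def analyse_attendance(daily_data):
--     # Write your code here
--     all_days = [set(day.keys()) for day in daily_data]
--     common_codes = sorted(set.intersection(*all_days))
--
--     # Step 2: Build registry of all unique attendees per country
--     registry = {}
--     for day in daily_data:
--         for country, names in day.items():
--             if country not in registry:
--                 registry[country] = set()
--             registry[country].update(names)
--
--     # Convert sets to sorted lists
--     for country in registry:
--         registry[country] = sorted(registry[country])
--
--     # Step 3: Countries present on first day but not on last day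
--     first_day = set(daily_data[0].keys())
--     last_day = set(daily_data[-1].keys())
--     missing_on_last_day = sorted(first_day - last_day)
--
--     return [common_codes, registry, missing_on_last_day]
-- ===== SOURCE B (Python) =====
-- def analyse_attendance(daily_data):
--     n = len(daily_data)
--     counts = {}
--     registry = {}
--     for day in daily_data:
--         for country, names in day.items():
--             counts[country] = counts.get(country, 0) + 1
--             if country in registry:
--                 registry[country].update(names)
--             else:
--                 registry[country] = set(names)
--     common_codes = sorted(c for c, k in counts.items() if k == n)
--     result_registry = {c: sorted(s) for c, s in registry.items()}
--     first = daily_data[0].keys()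
--     last = daily_data[-1].keys()
--     missing_on_last_day = sorted(c for c in first if c not in last)
--     return [common_codes, result_registry, missing_on_last_day]
-- ===== Notes on version B (the rewrite author's own statement) =====
-- stated objective: alternative
-- what changed: B replaces A's build-all-keysets-then-set.intersection pass by a single pass that counts per-country day occurrences in a dict (common = countries whose count equals len(daily_data)) and fuses the registry union into the same loop; missing_on_last_day is a direct filter of the first day's keys against the last day's dict instead of a set difference.
import Mathlib
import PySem

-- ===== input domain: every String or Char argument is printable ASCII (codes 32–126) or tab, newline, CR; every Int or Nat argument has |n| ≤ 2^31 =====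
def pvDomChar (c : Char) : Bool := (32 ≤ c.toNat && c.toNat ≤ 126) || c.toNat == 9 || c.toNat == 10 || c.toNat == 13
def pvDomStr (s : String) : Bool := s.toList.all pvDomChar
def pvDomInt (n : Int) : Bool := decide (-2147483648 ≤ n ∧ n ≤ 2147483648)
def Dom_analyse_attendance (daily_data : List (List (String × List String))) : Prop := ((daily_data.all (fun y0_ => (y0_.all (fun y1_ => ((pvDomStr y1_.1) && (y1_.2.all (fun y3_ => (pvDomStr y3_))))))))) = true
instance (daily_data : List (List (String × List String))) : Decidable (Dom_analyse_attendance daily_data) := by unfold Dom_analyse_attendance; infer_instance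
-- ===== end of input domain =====

-- B replaces A's keysets+set.intersection pass by one counting pass (common = countries seen on every day),
-- fusing the registry union into the same loop; equal output on every non-empty input (both raise on []).

-- ===== PORT A =====
def analyse_attendance (daily_data : List (List (String × List String))) : List String × (List (String × List String)) × List String :=
  let days := daily_data.map PySem.Dict.ofList
  match days with
  | [] => ([], [], [])   -- set.intersection(*[]) raises TypeError: excluded by Pre_
  | d0 :: rest =>
    let all_days := (d0 :: rest).map (fun d => PySem.Set.ofList (PySem.Dict.keys d))
    let common_codes :=
      PySem.List.sorted (all_days.tail.foldl PySem.Set.inter (all_days.headD [])) (fun x => x) false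
    let registry : PySem.Dict String (PySem.Set String) :=
      (d0 :: rest).foldl (fun r day =>
        (PySem.Dict.items day).foldl (fun r p =>
          let r1 := if PySem.Dict.contains r p.1 then r else PySem.Dict.insert r p.1 ([] : PySem.Set String)
          PySem.Dict.modify r1 p.1 [] (fun s => PySem.Set.update s p.2)) r)
        PySem.Dict.empty
    let registryOut := (PySem.Dict.items registry).map (fun p => (p.1, PySem.List.sorted p.2 (fun x => x) false))
    let first_day := PySem.Set.ofList (PySem.Dict.keys ((PySem.List.pyGet? (d0 :: rest) 0).getD PySem.Dict.empty))
    let last_day := PySem.Set.ofList (PySem.Dict.keys ((PySem.List.pyGet? (d0 :: rest) (-1)).getD PySem.Dict.empty))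
    let missing := PySem.List.sorted (PySem.Set.diff first_day last_day) (fun x => x) false
    (common_codes, registryOut, missing)

-- ===== PORT B =====
def analyse_attendance_alt (daily_data : List (List (String × List String))) : List String × (List (String × List String)) × List String :=
  let n : Int := daily_data.length
  match daily_data.map PySem.Dict.ofList with
  | [] => ([], [], [])   -- daily_data[0] raises IndexError: excluded by Pre_
  | d0 :: rest =>
    let cr : PySem.Dict String Int × PySem.Dict String (PySem.Set String) :=
      (d0 :: rest).foldl (fun s day =>
        (PySem.Dict.items day).foldl (fun s p =>
          (PySem.Dict.insert s.1 p.1 (PySem.Dict.getD s.1 p.1 0 + 1),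
           if PySem.Dict.contains s.2 p.1 then
             PySem.Dict.modify s.2 p.1 [] (fun t => PySem.Set.update t p.2)
           else PySem.Dict.insert s.2 p.1 (PySem.Set.ofList p.2))) s)
        (PySem.Dict.empty, PySem.Dict.empty)
    let common_codes :=
      PySem.List.sorted (((PySem.Dict.items cr.1).filter (fun p => p.2 == n)).map Prod.fst) (fun x => x) false
    let result_registry := (PySem.Dict.items cr.2).map (fun p => (p.1, PySem.List.sorted p.2 (fun x => x) false))
    let dlast := (PySem.List.pyGet? (d0 :: rest) (-1)).getD PySem.Dict.empty
    let missing := PySem.List.sorted ((PySem.Dict.keys d0).filter (fun c => !(PySem.Dict.contains dlast c))) (fun x => x) false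
    (common_codes, result_registry, missing)

-- ===== PRECONDITION & SPEC =====
-- Pre_ excludes only the empty list, on which A raises TypeError (set.intersection with no arguments).
def Pre_analyse_attendance (daily_data : List (List (String × List String))) : Prop := daily_data ≠ []
instance (daily_data : List (List (String × List String))) : Decidable (Pre_analyse_attendance daily_data) := by unfold Pre_analyse_attendance; infer_instance
def pvWitness_analyse_attendance : (List (List (String × List String))) := [[("US", ["ann", "bob"])], [("US", ["cid"]), ("FR", [])]]
def Spec_analyse_attendance (daily_data : List (List (String × List String))) (out : List String × (List (String × List String)) × List String) : Prop := out = analyse_attendance_alt daily_data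
instance (daily_data : List (List (String × List String))) (out : List String × (List (String × List String)) × List String) : Decidable (Spec_analyse_attendance daily_data out) := by unfold Spec_analyse_attendance; infer_instance

-- ===== CLAIM (what is proved, stated in full; the proofs are below) =====
def Claim_equal_analyse_attendance : Prop := ∀ (daily_data : List (List (String × List String))), Dom_analyse_attendance daily_data → Pre_analyse_attendance daily_data → Spec_analyse_attendance daily_data (analyse_attendance daily_data)


-- ===== LEMMAS AND PROOFS =====

theorem pv_foldl_pair {A B C : Type} (l : List A) (f : B → A → B) (g : C → A → C) (i : B × C) :
    l.foldl (fun s x => (f s.1 x, g s.2 x)) i = (l.foldl f i.1, l.foldl g i.2) := by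
  induction l generalizing i with
  | nil => rfl
  | cons x l ih => simp [List.foldl_cons, ih]

theorem pv_foldl_flatMap {A B C : Type} (l : List A) (g : A → List B) (f : C → B → C) (i : C) :
    l.foldl (fun a x => (g x).foldl f a) i = (l.flatMap g).foldl f i := by
  induction l generalizing i with
  | nil => rfl
  | cons x l ih => simp [List.flatMap_cons, List.foldl_append, ih]

theorem pv_counts_eq (days : List (PySem.Dict String (List String))) :
    days.foldl (fun c day => (PySem.Dict.items day).foldl
        (fun c p => c.insert p.1 (c.getD p.1 0 + 1)) c) PySem.Dict.empty
      = PySem.Dict.counter (days.flatMap PySem.Dict.keys) := by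
  have h : (fun (c : PySem.Dict String Int) (day : PySem.Dict String (List String)) =>
        (PySem.Dict.items day).foldl (fun c p => c.insert p.1 (c.getD p.1 0 + 1)) c)
      = (fun c day => (PySem.Dict.keys day).foldl (fun c k => c.insert k (c.getD k 0 + 1)) c) := by
    funext c day
    simp [PySem.Dict.keys, List.foldl_map]
  rw [h, pv_foldl_flatMap, PySem.Dict.foldl_insert_getD_add_one_eq_counter]

theorem pv_mem_foldl_inter (t : List (PySem.Set String)) (h : PySem.Set String) (x : String) :
    x ∈ t.foldl PySem.Set.inter h ↔ x ∈ h ∧ ∀ s ∈ t, x ∈ s := by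
  induction t generalizing h with
  | nil => simp
  | cons s t ih =>
    simp only [List.foldl_cons, ih, PySem.Set.mem_inter, List.mem_cons]
    constructor
    · rintro ⟨⟨hh, hs⟩, hall⟩
      exact ⟨hh, fun s' hs' => hs'.elim (fun e => e ▸ hs) (hall s')⟩
    · rintro ⟨hh, hall⟩
      exact ⟨⟨hh, hall s (Or.inl rfl)⟩, fun s' hs' => hall s' (Or.inr hs')⟩

theorem pv_nodup_foldl_inter (t : List (PySem.Set String)) (h : PySem.Set String)
    (hh : h.Nodup) : (t.foldl PySem.Set.inter h).Nodup := by
  induction t generalizing h with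
  | nil => exact hh
  | cons s t ih => exact ih _ (PySem.Set.nodup_inter _ _ hh)

theorem pv_count_flat_le (ds : List (PySem.Dict String (List String)))
    (hn : ∀ d ∈ ds, d.keys.Nodup) (x : String) :
    (ds.flatMap PySem.Dict.keys).count x ≤ ds.length := by
  induction ds with
  | nil => simp
  | cons d ds ih =>
    simp only [List.flatMap_cons, List.count_append, List.length_cons]
    have h1 : (PySem.Dict.keys d).count x ≤ 1 :=
      List.nodup_iff_count_le_one.mp (hn d (by simp)) x
    have h2 := ih (fun d' hd' => hn d' (by simp [hd']))
    omega

theorem pv_count_flat_eq_iff (ds : List (PySem.Dict String (List String)))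
    (hn : ∀ d ∈ ds, d.keys.Nodup) (x : String) :
    (ds.flatMap PySem.Dict.keys).count x = ds.length ↔ ∀ d ∈ ds, x ∈ d.keys := by
  induction ds with
  | nil => simp
  | cons d ds ih =>
    have hnd : d.keys.Nodup := hn d (by simp)
    have hn' : ∀ d' ∈ ds, PySem.Dict.keys d'|>.Nodup := fun d' hd' => hn d' (by simp [hd'])
    have h1 : (PySem.Dict.keys d).count x ≤ 1 := List.nodup_iff_count_le_one.mp hnd x
    have h2 := pv_count_flat_le ds hn' x
    simp only [List.flatMap_cons, List.count_append, List.length_cons, List.mem_cons]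
    constructor
    · intro heq
      have hd1 : (PySem.Dict.keys d).count x = 1 := by omega
      have hrest : (ds.flatMap PySem.Dict.keys).count x = ds.length := by omega
      intro d' hd'
      rcases hd' with rfl | hd'
      · exact List.count_pos_iff.mp (by omega)
      · exact ((ih hn').mp hrest) d' hd'
    · intro hall
      have hd1 : 0 < (PySem.Dict.keys d).count x := List.count_pos_iff.mpr (hall d (Or.inl rfl))
      have hrest : (ds.flatMap PySem.Dict.keys).count x = ds.length :=
        (ih hn').mpr (fun d' hd' => hall d' (Or.inr hd'))
      omega

theorem pv_reg_step (r : PySem.Dict String (PySem.Set String)) (p : String × List String) :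
    (if r.contains p.1 then r else r.insert p.1 ([] : PySem.Set String)).modify p.1 []
        (fun s => PySem.Set.update s p.2)
      = if r.contains p.1 then r.modify p.1 [] (fun t => PySem.Set.update t p.2)
        else r.insert p.1 (PySem.Set.ofList p.2) := by
  by_cases h : r.contains p.1
  · simp [h]
  · simp [h, PySem.Dict.modify, PySem.Dict.getD_insert_self, PySem.Dict.insert_insert_self,
      PySem.Set.update_nil_left]

theorem pv_common_eq (d0 : PySem.Dict String (List String)) (rest : List (PySem.Dict String (List String)))
    (h0 : (PySem.Dict.keys d0).Nodup) (hr : ∀ d ∈ rest, (PySem.Dict.keys d).Nodup) :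
    PySem.List.sorted (List.foldl PySem.Set.inter (PySem.Set.ofList d0.keys) (rest.map (fun d => PySem.Set.ofList d.keys))) (fun x => x)
      = PySem.List.sorted (List.map Prod.fst (List.filter (fun p => p.2 == (((d0::rest).length : Nat) : Int)) (PySem.Dict.counter ((d0::rest).flatMap PySem.Dict.keys)).items)) (fun x => x) := by
  have hnall : ∀ d ∈ d0 :: rest, (PySem.Dict.keys d).Nodup := by
    intro d hd
    rcases List.mem_cons.mp hd with rfl | hd
    · exact h0
    · exact hr d hd
  rw [PySem.Dict.items_counter, List.filter_map, List.map_map]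
  have hfun : (Prod.fst ∘ fun k => (k, ((((d0::rest).flatMap PySem.Dict.keys).count k : Nat) : Int))) = fun (k : String) => k := by
    funext k; rfl
  rw [hfun, List.map_id']
  apply PySem.List.sorted_eq_sorted_of_perm _ _ _ (fun x y h => h)
  rw [List.perm_ext_iff_of_nodup (pv_nodup_foldl_inter _ _ (PySem.Set.nodup_ofList _))
    ((PySem.Set.nodup_ofList _).filter _)]
  intro x
  rw [pv_mem_foldl_inter, List.mem_filter]
  have hiff := pv_count_flat_eq_iff (d0 :: rest) hnall x
  constructor
  · rintro ⟨hx0, hall⟩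
    have hx0' : x ∈ d0.keys := (PySem.Set.mem_ofList _ _).mp hx0
    have hmemall : ∀ d ∈ d0 :: rest, x ∈ d.keys := by
      intro d hd
      rcases List.mem_cons.mp hd with rfl | hd
      · exact hx0'
      · exact (PySem.Set.mem_ofList _ _).mp (hall _ (List.mem_map_of_mem hd))
    refine ⟨(PySem.Set.mem_ofList _ _).mpr (List.mem_flatMap.mpr ⟨d0, by simp, hx0'⟩), ?_⟩
    have hc := hiff.mpr hmemall
    simp only [Function.comp_def, beq_iff_eq]
    exact_mod_cast hc
  · rintro ⟨hxL, hpred⟩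
    have hcount : ((d0::rest).flatMap PySem.Dict.keys).count x = (d0::rest).length := by
      simp only [Function.comp_def, beq_iff_eq, Nat.cast_inj] at hpred
      exact_mod_cast hpred
    have hmemall := hiff.mp hcount
    refine ⟨(PySem.Set.mem_ofList _ _).mpr (hmemall d0 (by simp)), ?_⟩
    intro s hs
    rcases List.mem_map.mp hs with ⟨d, hd, rfl⟩
    exact (PySem.Set.mem_ofList _ _).mpr (hmemall d (by simp [hd]))

theorem pv_missing_eq (d0 dl : PySem.Dict String (List String)) (h0 : (PySem.Dict.keys d0).Nodup) :
    PySem.List.sorted ((PySem.Set.ofList d0.keys).diff (PySem.Set.ofList dl.keys)) (fun x => x)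
      = PySem.List.sorted (d0.keys.filter (fun c => !dl.contains c)) (fun x => x) := by
  apply PySem.List.sorted_eq_sorted_of_perm _ _ _ (fun x y h => h)
  rw [List.perm_ext_iff_of_nodup (PySem.Set.nodup_diff _ _ (PySem.Set.nodup_ofList _)) (h0.filter _)]
  intro c
  simp [PySem.Set.mem_diff, PySem.Set.mem_ofList, List.mem_filter, ← PySem.Dict.contains_iff_mem_keys]

-- ===== VERDICT (by name: the statement is the Claim_ definition above) =====
theorem analyse_attendance_spec : Claim_equal_analyse_attendance := by
  intro dd _ hpre
  unfold Spec_analyse_attendance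
  cases dd with
  | nil => exact absurd rfl hpre
  | cons a l =>
    simp only [analyse_attendance, analyse_attendance_alt, List.map_cons]
    have hsplit :
        List.foldl (fun (s : PySem.Dict String Int × PySem.Dict String (PySem.Set String)) day =>
            List.foldl (fun s (p : String × List String) =>
              (s.1.insert p.1 (s.1.getD p.1 0 + 1),
                if s.2.contains p.1 = true then s.2.modify p.1 [] fun t => t.update p.2
                else s.2.insert p.1 (PySem.Set.ofList p.2))) s day.items)
          (PySem.Dict.empty, PySem.Dict.empty) (PySem.Dict.ofList a :: List.map PySem.Dict.ofList l)
        = (List.foldl (fun c day => List.foldl (fun (c : PySem.Dict String Int) (p : String × List String) => c.insert p.1 (c.getD p.1 0 + 1)) c day.items) PySem.Dict.empty (PySem.Dict.ofList a :: List.map PySem.Dict.ofList l),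
           List.foldl (fun r day => List.foldl (fun (r : PySem.Dict String (PySem.Set String)) (p : String × List String) => if r.contains p.1 = true then r.modify p.1 [] (fun t => t.update p.2) else r.insert p.1 (PySem.Set.ofList p.2)) r day.items) PySem.Dict.empty (PySem.Dict.ofList a :: List.map PySem.Dict.ofList l)) := by
      have h1 : (fun (s : PySem.Dict String Int × PySem.Dict String (PySem.Set String)) (day : PySem.Dict String (List String)) =>
            List.foldl (fun s (p : String × List String) =>
              (s.1.insert p.1 (s.1.getD p.1 0 + 1),
                if s.2.contains p.1 = true then s.2.modify p.1 [] fun t => t.update p.2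
                else s.2.insert p.1 (PySem.Set.ofList p.2))) s day.items)
          = (fun s day => (List.foldl (fun (c : PySem.Dict String Int) (p : String × List String) => c.insert p.1 (c.getD p.1 0 + 1)) s.1 day.items,
                           List.foldl (fun (r : PySem.Dict String (PySem.Set String)) (p : String × List String) => if r.contains p.1 = true then r.modify p.1 [] (fun t => t.update p.2) else r.insert p.1 (PySem.Set.ofList p.2)) s.2 day.items)) :=
        funext fun s => funext fun day =>
          pv_foldl_pair day.items (fun (c : PySem.Dict String Int) (p : String × List String) => c.insert p.1 (c.getD p.1 0 + 1))
            (fun (r : PySem.Dict String (PySem.Set String)) (p : String × List String) => if r.contains p.1 = true then r.modify p.1 [] (fun t => t.update p.2) else r.insert p.1 (PySem.Set.ofList p.2)) s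
      rw [h1]
      exact pv_foldl_pair (PySem.Dict.ofList a :: List.map PySem.Dict.ofList l)
        (fun (c : PySem.Dict String Int) day => List.foldl (fun c (p : String × List String) => c.insert p.1 (c.getD p.1 0 + 1)) c day.items)
        (fun (r : PySem.Dict String (PySem.Set String)) day => List.foldl (fun r (p : String × List String) => if r.contains p.1 = true then r.modify p.1 [] (fun t => t.update p.2) else r.insert p.1 (PySem.Set.ofList p.2)) r day.items)
        (PySem.Dict.empty, PySem.Dict.empty)
    rw [hsplit]
    have hstep : (fun (r : PySem.Dict String (PySem.Set String)) (p : String × List String) =>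
          (if r.contains p.1 = true then r else r.insert p.1 []).modify p.1 [] fun s => s.update p.2)
        = (fun (r : PySem.Dict String (PySem.Set String)) (p : String × List String) =>
            if r.contains p.1 = true then r.modify p.1 [] (fun t => t.update p.2)
            else r.insert p.1 (PySem.Set.ofList p.2)) :=
      funext fun r => funext fun p => pv_reg_step r p
    rw [hstep, pv_counts_eq]
    simp only [List.headD_cons, List.tail_cons]
    have hget0 : PySem.List.pyGet? (PySem.Dict.ofList a :: List.map PySem.Dict.ofList l) (0:Int) = some (PySem.Dict.ofList a) := by
      simp [PySem.List.pyGet?, PySem.List.pyIdx?]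
    have hlen : (a :: l).length = (PySem.Dict.ofList a :: List.map PySem.Dict.ofList l).length := by simp
    rw [hlen, hget0]
    simp only [Prod.mk.injEq, Option.getD_some]
    refine ⟨?_, trivial, ?_⟩
    · exact pv_common_eq (PySem.Dict.ofList a) (List.map PySem.Dict.ofList l)
        (PySem.Dict.nodup_keys_ofList a)
        (by intro d hd; rcases List.mem_map.mp hd with ⟨y, _, rfl⟩; exact PySem.Dict.nodup_keys_ofList y)
    · exact pv_missing_eq _ _ (PySem.Dict.nodup_keys_ofList a)
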